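-- pv_equiv track=rewrite | github.com/HSJung93/-Python-algorithm_interview | 22-higher_than_now.py | higher
-- ===== SOURCE A (Python) =====
-- def higher(arr):
--   answer = [0] * len(arr)
--   s = []
--   for i, cur in enumerate(arr):
--     # 특정 조건 시에 한꺼번에 많은 일이 일어날 때
--     while s and cur > arr[s[-1]]:
--       last = s.pop()
--       answer[last] = i - last
--     s.append(i)
--
--   return answer
-- ===== SOURCE B (Python) =====
-- def higher(arr):
--     def dist(i):
--         for j in range(i + 1, len(arr)):
--             if arr[j] > arr[i]:
--                 return j - i
--         return 0
--     return [dist(i) for i in range(len(arr))]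
-- ===== Notes on version B (the rewrite author's own statement) =====
-- stated objective: simpler
-- what changed: Replaced the monotonic index stack with a direct per-index forward scan: for each i, answer[i] is the distance to the first later element strictly greater, else 0.
import Mathlib
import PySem

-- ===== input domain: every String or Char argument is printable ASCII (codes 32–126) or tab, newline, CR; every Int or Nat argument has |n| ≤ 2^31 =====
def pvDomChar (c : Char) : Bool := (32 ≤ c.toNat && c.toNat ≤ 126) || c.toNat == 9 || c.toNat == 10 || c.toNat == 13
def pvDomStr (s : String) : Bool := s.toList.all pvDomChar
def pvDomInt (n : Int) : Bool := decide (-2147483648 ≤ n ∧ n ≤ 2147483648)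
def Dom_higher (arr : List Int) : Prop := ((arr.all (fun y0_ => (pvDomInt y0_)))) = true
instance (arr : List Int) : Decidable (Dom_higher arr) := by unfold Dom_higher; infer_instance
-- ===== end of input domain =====

-- B replaces A's monotonic index stack by a direct per-index forward scan (simpler; same results).

-- ===== PORT A =====
-- the inner `while s and cur > arr[s[-1]]` loop; the stack s is kept top-first
def higherPop (arr : List Int) (i : Nat) (cur : Int) : List Nat → List Int → List Nat × List Int
  | [], answer => ([], answer)
  | last :: s, answer =>
    if arr.getD last 0 < cur then
      higherPop arr i cur s (answer.set last ((i : Int) - (last : Int)))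
    else (last :: s, answer)

-- one iteration of the `for i, cur in enumerate(arr)` loop
def higherStep (arr : List Int) (st : List Nat × List Int) (p : Int × Nat) : List Nat × List Int :=
  let r := higherPop arr p.2 p.1 st.1 st.2
  (p.2 :: r.1, r.2)

def higher (arr : List Int) : List Int :=
  (arr.zipIdx.foldl (higherStep arr) ([], List.replicate arr.length 0)).2

-- ===== PORT B =====
-- the inner `for j in range(i+1, len(arr))` scan with early return
def higherDist (arr : List Int) (i : Nat) : List Nat → Int
  | [] => 0
  | j :: js => if arr.getD i 0 < arr.getD j 0 then (j : Int) - (i : Int) else higherDist arr i js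

def higher_alt (arr : List Int) : List Int :=
  (List.range arr.length).map (fun i => higherDist arr i (List.range' (i + 1) (arr.length - (i + 1))))

-- ===== PRECONDITION & SPEC =====
def Spec_higher (arr : List Int) (out : List Int) : Prop := out = higher_alt arr
instance (arr : List Int) (out : List Int) : Decidable (Spec_higher arr out) := by unfold Spec_higher; infer_instance

-- ===== CLAIM (what is proved, stated in full; the proofs are below) =====
def Claim_equal_higher : Prop := ∀ (arr : List Int), Dom_higher arr → Spec_higher arr (higher arr)

-- ===== LEMMAS AND PROOFS =====

-- "no element strictly above arr[k] appears at an index j with k < j < i"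
def noHB (arr : List Int) (i k : Nat) : Bool :=
  (List.range i).all (fun j => decide (k < j → arr.getD j 0 ≤ arr.getD k 0))

-- the stack A holds after processing indices 0..i-1 (top first)
def pend (arr : List Int) (i : Nat) : List Nat :=
  ((List.range i).filter (noHB arr i)).reverse

-- the answer entry for k after processing indices 0..i-1
def pans (arr : List Int) (i k : Nat) : Int :=
  higherDist arr k (List.range' (k + 1) (i - (k + 1)))

theorem noHB_iff (arr : List Int) (i k : Nat) :
    noHB arr i k = true ↔ ∀ j, j < i → k < j → arr.getD j 0 ≤ arr.getD k 0 := by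
  simp only [noHB, List.all_eq_true, List.mem_range, decide_eq_true_eq]

theorem mem_pend (arr : List Int) (i k : Nat) :
    k ∈ pend arr i ↔ k < i ∧ ∀ j, j < i → k < j → arr.getD j 0 ≤ arr.getD k 0 := by
  simp only [pend, List.mem_reverse, List.mem_filter, List.mem_range, noHB_iff]

theorem pend_pairwise (arr : List Int) (i : Nat) :
    (pend arr i).Pairwise (fun x y => y < x) := by
  unfold pend
  rw [List.pairwise_reverse]
  exact List.pairwise_lt_range.filter _

theorem higherDist_zero (arr : List Int) (k : Nat) (l : List Nat)
    (h : ∀ j ∈ l, arr.getD j 0 ≤ arr.getD k 0) : higherDist arr k l = 0 := by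
  induction l with
  | nil => rfl
  | cons j js ih =>
    have hj := h j (by simp)
    simp only [higherDist, if_neg (by omega : ¬ arr.getD k 0 < arr.getD j 0)]
    exact ih fun x hx => h x (by simp [hx])

theorem higherDist_append_skip (arr : List Int) (k : Nat) (l l' : List Nat)
    (h : ∀ j ∈ l, arr.getD j 0 ≤ arr.getD k 0) :
    higherDist arr k (l ++ l') = higherDist arr k l' := by
  induction l with
  | nil => rfl
  | cons j js ih =>
    have hj := h j (by simp)
    simp only [List.cons_append, higherDist, if_neg (by omega : ¬ arr.getD k 0 < arr.getD j 0)]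
    exact ih fun x hx => h x (by simp [hx])

theorem higherDist_append_hit (arr : List Int) (k : Nat) (l l' : List Nat)
    (j₀ : Nat) (hj : j₀ ∈ l) (hv : arr.getD k 0 < arr.getD j₀ 0) :
    higherDist arr k (l ++ l') = higherDist arr k l := by
  induction l with
  | nil => simp at hj
  | cons j js ih =>
    by_cases hcase : arr.getD k 0 < arr.getD j 0
    · simp only [List.cons_append, higherDist, if_pos hcase]
    · simp only [List.cons_append, higherDist, if_neg hcase]
      rcases List.mem_cons.mp hj with rfl | hjm
      · omega
      · exact ih hjm

theorem pans_zero_of_le (arr : List Int) {i k : Nat} (h : i ≤ k + 1) : pans arr i k = 0 := by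
  simp [pans, Nat.sub_eq_zero_of_le h, higherDist]

theorem range'_split (i k : Nat) (hk : k < i) :
    List.range' (k + 1) (i + 1 - (k + 1)) = List.range' (k + 1) (i - (k + 1)) ++ [i] := by
  have h1 : i + 1 - (k + 1) = (i - (k + 1)) + 1 := by omega
  rw [h1, List.range'_concat]
  congr 2
  omega

theorem pans_succ_nohigh (arr : List Int) {i k : Nat} (hk : k < i)
    (hno : ∀ j, j < i → k < j → arr.getD j 0 ≤ arr.getD k 0) :
    pans arr (i + 1) k =
      if arr.getD k 0 < arr.getD i 0 then (i : Int) - (k : Int) else 0 := by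
  unfold pans
  rw [range'_split i k hk, higherDist_append_skip]
  · simp [higherDist]
  · intro j hj
    rw [List.mem_range'] at hj
    obtain ⟨m, hm, rfl⟩ := hj
    exact hno _ (by omega) (by omega)

theorem pans_eq_zero_nohigh (arr : List Int) {i k : Nat}
    (hno : ∀ j, j < i → k < j → arr.getD j 0 ≤ arr.getD k 0) :
    pans arr i k = 0 := by
  apply higherDist_zero
  intro j hj
  rw [List.mem_range'] at hj
  obtain ⟨m, hm, rfl⟩ := hj
  exact hno _ (by omega) (by omega)

theorem pans_succ_high (arr : List Int) {i k j₀ : Nat} (hk : k < i)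
    (hj : j₀ < i) (hkj : k < j₀) (hv : arr.getD k 0 < arr.getD j₀ 0) :
    pans arr (i + 1) k = pans arr i k := by
  unfold pans
  rw [range'_split i k hk, higherDist_append_hit arr k _ _ j₀ _ hv]
  rw [List.mem_range']
  exact ⟨j₀ - (k + 1), by omega, by omega⟩

theorem pend_zero (arr : List Int) : pend arr 0 = [] := by simp [pend]

theorem pend_succ (arr : List Int) (i : Nat) :
    pend arr (i + 1) =
      i :: (pend arr i).filter (fun k => decide (arr.getD i 0 ≤ arr.getD k 0)) := by
  unfold pend
  rw [List.range_succ, List.filter_append]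
  have hi : noHB arr (i + 1) i = true := by
    rw [noHB_iff]; intro j h1 h2; omega
  have hcongr : (List.range i).filter (noHB arr (i + 1)) =
      (List.range i).filter (fun k => decide (arr.getD i 0 ≤ arr.getD k 0) && noHB arr i k) := by
    apply List.filter_congr
    intro k hk
    rw [List.mem_range] at hk
    rw [Bool.eq_iff_iff, noHB_iff, Bool.and_eq_true, noHB_iff, decide_eq_true_eq]
    constructor
    · intro h
      exact ⟨h i (by omega) hk, fun j h1 h2 => h j (by omega) h2⟩
    · rintro ⟨h2, h1⟩ j hj hkj
      rcases Nat.lt_succ_iff_lt_or_eq.mp hj with hj' | rfl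
      · exact h1 j hj' hkj
      · exact h2
  rw [hcongr, List.filter_singleton, hi]
  simp only [cond_true, List.reverse_append, List.reverse_singleton, List.singleton_append,
    List.filter_reverse, List.filter_filter]

theorem pop_spec (arr : List Int) (i : Nat) :
    ∀ (s : List Nat) (answer : List Int),
      s.Pairwise (fun x y => y < x) →
      (∀ k ∈ s, k < i ∧ ∀ j, j < i → k < j → arr.getD j 0 ≤ arr.getD k 0) →
      (∀ k ∈ s, k < answer.length) →
      (higherPop arr i (arr.getD i 0) s answer).1 =
          s.filter (fun k => decide (arr.getD i 0 ≤ arr.getD k 0)) ∧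
      (higherPop arr i (arr.getD i 0) s answer).2.length = answer.length ∧
      (∀ m : Nat, (higherPop arr i (arr.getD i 0) s answer).2.getD m 0 =
        if m ∈ s ∧ arr.getD m 0 < arr.getD i 0 then (i : Int) - (m : Int)
        else answer.getD m 0) := by
  intro s
  induction s with
  | nil => intro answer _ _ _; simp [higherPop]
  | cons k t ih =>
    intro answer hpw hmem hlen
    have hkmem := hmem k (by simp)
    obtain ⟨hka, hpwt⟩ := List.pairwise_cons.mp hpw
    by_cases hpop : arr.getD k 0 < arr.getD i 0
    · -- k is popped
      simp only [higherPop, if_pos hpop]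
      obtain ⟨hrest, hlen', hpt⟩ :=
        ih (answer.set k ((i : Int) - (k : Int))) hpwt
          (fun x hx => hmem x (by simp [hx]))
          (fun x hx => by rw [List.length_set]; exact hlen x (by simp [hx]))
      refine ⟨?_, ?_, ?_⟩
      · rw [hrest, List.filter_cons, if_neg (by simp only [decide_eq_true_eq]; omega)]
      · rw [hlen', List.length_set]
      · intro m
        rw [hpt m]
        by_cases hmk : m = k
        · subst hmk
          have hmt : m ∉ t := fun h => absurd (hka m h) (by omega)
          rw [if_neg (fun h => hmt h.1), if_pos ⟨by simp, hpop⟩,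
            List.getD_eq_getElem?_getD, List.getElem?_set_self (hlen m (by simp))]
          rfl
        · by_cases hmt : m ∈ t
          · by_cases hlt : arr.getD m 0 < arr.getD i 0
            · rw [if_pos ⟨hmt, hlt⟩, if_pos ⟨by simp [hmt], hlt⟩]
            · rw [if_neg (fun h => hlt h.2), if_neg (fun h => hlt h.2),
                List.getD_eq_getElem?_getD, List.getD_eq_getElem?_getD,
                List.getElem?_set_ne (fun h => hmk h.symm)]
          · rw [if_neg (fun h => hmt h.1),
              if_neg (fun h => by rcases List.mem_cons.mp h.1 with h' | h' <;> [exact hmk h'; exact hmt h']),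
              List.getD_eq_getElem?_getD, List.getD_eq_getElem?_getD,
              List.getElem?_set_ne (fun h => hmk h.symm)]
    · -- k stays; everything below k stays too
      simp only [higherPop, if_neg hpop]
      have hfix : ∀ x ∈ t, arr.getD i 0 ≤ arr.getD x 0 := by
        intro x hx
        have hxk : x < k := hka x hx
        have : arr.getD k 0 ≤ arr.getD x 0 :=
          (hmem x (by simp [hx])).2 k hkmem.1 hxk
        omega
      refine ⟨?_, by simp, ?_⟩
      · rw [List.filter_cons, if_pos (by simp only [decide_eq_true_eq]; omega),
          List.filter_eq_self.mpr
            (fun x hx => by simp only [decide_eq_true_eq]; exact hfix x hx)]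
      · intro m
        rw [if_neg ?_]
        rintro ⟨hms, hmlt⟩
        rcases List.mem_cons.mp hms with rfl | hmt
        · omega
        · have := hfix m hmt; omega

theorem getD_map_pans (arr : List Int) (i m : Nat) (hm : m < arr.length) :
    ((List.range arr.length).map (fun k => pans arr i k)).getD m 0 = pans arr i m := by
  rw [List.getD_eq_getElem _ _ (by simpa using hm)]
  simp

theorem step_spec (arr : List Int) (i : Nat) (hi : i < arr.length) :
    higherStep arr (pend arr i, (List.range arr.length).map (fun k => pans arr i k))
        (arr.getD i 0, i) =
      (pend arr (i + 1), (List.range arr.length).map (fun k => pans arr (i + 1) k)) := by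
  have hmem : ∀ k ∈ pend arr i, k < i ∧ ∀ j, j < i → k < j → arr.getD j 0 ≤ arr.getD k 0 :=
    fun k hk => (mem_pend arr i k).mp hk
  have hlen : ∀ k ∈ pend arr i,
      k < ((List.range arr.length).map (fun k => pans arr i k)).length := by
    intro k hk
    simp only [List.length_map, List.length_range]
    exact lt_of_lt_of_le (hmem k hk).1 (le_of_lt hi)
  obtain ⟨h1, h2, h3⟩ := pop_spec arr i (pend arr i)
    ((List.range arr.length).map (fun k => pans arr i k)) (pend_pairwise arr i) hmem hlen
  unfold higherStep
  refine Prod.ext ?_ ?_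
  · show i :: _ = _
    rw [h1, pend_succ]
  · show (higherPop arr i (arr.getD i 0) _ _).2 = _
    apply List.ext_getElem
    · rw [h2]; simp
    · intro m hm1 hm2
      have hmn : m < arr.length := by simpa using hm2
      rw [← List.getD_eq_getElem _ 0 hm1, ← List.getD_eq_getElem _ 0 hm2, h3 m,
        getD_map_pans arr (i+1) m hmn]
      by_cases hc : m ∈ pend arr i ∧ arr.getD m 0 < arr.getD i 0
      · rw [if_pos hc]
        obtain ⟨hmp, hlt⟩ := hc
        obtain ⟨hmi, hno⟩ := (mem_pend arr i m).mp hmp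
        rw [pans_succ_nohigh arr hmi hno, if_pos hlt]
      · rw [if_neg hc, getD_map_pans arr i m hmn]
        by_cases hmi : m < i
        · by_cases hmp : m ∈ pend arr i
          · obtain ⟨_, hno⟩ := (mem_pend arr i m).mp hmp
            have hge : ¬ arr.getD m 0 < arr.getD i 0 := fun h => hc ⟨hmp, h⟩
            rw [pans_succ_nohigh arr hmi hno, if_neg hge, pans_eq_zero_nohigh arr hno]
          · have hnot : ¬ (m < i ∧ ∀ j, j < i → m < j → arr.getD j 0 ≤ arr.getD m 0) :=
              fun h => hmp ((mem_pend arr i m).mpr h)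
            push_neg at hnot
            obtain ⟨j₀, hj₀i, hmj₀, hv⟩ := hnot hmi
            rw [pans_succ_high arr hmi hj₀i hmj₀ (by omega)]
        · rw [pans_zero_of_le arr (by omega), pans_zero_of_le arr (by omega)]

theorem fold_inv (arr : List Int) :
    ∀ (t : List Int) (i : Nat), arr.drop i = t → i + t.length = arr.length →
      (t.zipIdx i).foldl (higherStep arr)
          (pend arr i, (List.range arr.length).map (fun k => pans arr i k)) =
        (pend arr arr.length,
          (List.range arr.length).map (fun k => pans arr arr.length k)) := by
  intro t
  induction t with
  | nil =>
    intro i _ hlen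
    simp only [List.length_nil, Nat.add_zero] at hlen
    subst hlen
    rfl
  | cons cur t' ih =>
    intro i hdrop hlen
    have hi : i < arr.length := by simp at hlen; omega
    have hcur : arr.getD i 0 = cur := by
      have h0 : (arr.drop i)[0]? = some cur := by rw [hdrop]; rfl
      rw [List.getElem?_drop] at h0
      simp only [Nat.add_zero] at h0
      simp [List.getD_eq_getElem?_getD, h0]
    have hdrop' : arr.drop (i + 1) = t' := by
      have h1 : (arr.drop i).drop 1 = t' := by rw [hdrop]; rfl
      rw [List.drop_drop] at h1
      exact h1
    rw [List.zipIdx_cons, List.foldl_cons, ← hcur, step_spec arr i hi]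
    exact ih (i + 1) hdrop' (by simp at hlen ⊢; omega)

theorem higher_eq (arr : List Int) : higher arr = higher_alt arr := by
  unfold higher
  have hinit : (([] : List Nat), List.replicate arr.length (0 : Int)) =
      (pend arr 0, (List.range arr.length).map (fun k => pans arr 0 k)) := by
    refine Prod.ext (by rw [pend_zero]) ?_
    show List.replicate arr.length (0 : Int) = _
    rw [List.map_congr_left (fun k _ => pans_zero_of_le arr (Nat.zero_le _)),
      List.map_const']
    simp
  rw [hinit]
  have hf := fold_inv arr arr 0 rfl (by simp)
  rw [show arr.zipIdx = arr.zipIdx 0 from rfl, hf]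
  rfl

-- ===== VERDICT (by name: the statement is the Claim_ definition above) =====
theorem higher_spec : Claim_equal_higher := by
  intro arr _
  exact higher_eq arr
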